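-- pv_equiv track=rewrite | github.com/jonswain/sudsolve | solver.py | check_only_possible_location
-- ===== SOURCE A (Python) =====
-- import itertools
--
-- def check_only_possible_location(
--     key: tuple[int, int], value: int, unknowns: dict
-- ) -> bool:
--     """Check if a cell is the only possible location for a value."""
--     row = [x[1] for x in unknowns.items() if x[0][0] == key[0] and x[0] != key]
--     column = [x[1] for x in unknowns.items() if x[0][1] == key[1] and x[0] != key]
--     square = [
--         unknowns.get((key[0] // 3 * 3 + i, key[1] // 3 * 3 + j), [])
--         for i in range(3)
--         for j in range(3)
--         if (key[0] // 3 * 3 + i, key[1] // 3 * 3 + j) != key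
--     ]
--     flattened_row = set(itertools.chain(*row))
--     flattened_column = set(itertools.chain(*column))
--     flattened_square = set(itertools.chain(*square))
--     return (
--         value not in flattened_row
--         or value not in flattened_column
--         or value not in flattened_square
--     )
-- ===== SOURCE B (Python) =====
-- def check_only_possible_location(
--     key: tuple[int, int], value: int, unknowns: dict
-- ) -> bool:
--     """Check if a cell is the only possible location for a value."""
--     found_in_row = found_in_col = found_in_square = False
--     for k, v in unknowns.items():
--         if k == key or value not in v:
--             continue
--         if k[0] == key[0]:
--             found_in_row = True
--         if k[1] == key[1]:
--             found_in_col = True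
--         if k[0] // 3 == key[0] // 3 and k[1] // 3 == key[1] // 3:
--             found_in_square = True
--     return not found_in_row or not found_in_col or not found_in_square
-- ===== Notes on version B (the rewrite author's own statement) =====
-- stated objective: simpler
-- what changed: A builds three comprehension lists (row, column, and a 9-cell block via dict.get) and three flattened sets before testing membership; B makes a single pass over unknowns.items() maintaining three boolean flags (row/column/block hit) and builds no intermediate lists or sets. Pre_ requires distinct (row,col) keys in the association list, since unknowns is a Python dict whose keys are unique and duplicate-key lists correspond to no Python input.
import Mathlib
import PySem

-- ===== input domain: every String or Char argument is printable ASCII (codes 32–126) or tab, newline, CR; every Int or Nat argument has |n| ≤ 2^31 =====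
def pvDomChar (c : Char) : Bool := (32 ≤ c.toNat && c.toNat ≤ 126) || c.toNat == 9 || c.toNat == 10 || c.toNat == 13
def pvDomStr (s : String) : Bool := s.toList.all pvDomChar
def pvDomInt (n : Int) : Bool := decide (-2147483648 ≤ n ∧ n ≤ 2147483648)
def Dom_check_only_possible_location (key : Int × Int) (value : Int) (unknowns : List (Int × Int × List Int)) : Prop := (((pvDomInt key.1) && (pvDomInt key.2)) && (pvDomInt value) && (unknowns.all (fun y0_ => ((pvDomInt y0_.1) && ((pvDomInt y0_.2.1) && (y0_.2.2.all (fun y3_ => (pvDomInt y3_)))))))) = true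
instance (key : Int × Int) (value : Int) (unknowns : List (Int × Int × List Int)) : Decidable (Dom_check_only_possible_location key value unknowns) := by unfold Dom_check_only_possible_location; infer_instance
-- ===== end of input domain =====

-- B replaces A's three list-building comprehensions + three flattened sets by ONE pass over the
-- items with three boolean flags (objective: simpler / constant-factor cheaper; no sets built).

-- ===== PORT A =====
-- unknowns.get(cell, []): first entry whose (row, col) equals cell, else [] (exact for a Python
-- dict, whose keys are unique — Pre_ below requires exactly that of the association list).
def pyGetCell (unknowns : List (Int × Int × List Int)) (cell : Int × Int) : List Int :=
  match unknowns with
  | [] => []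
  | x :: rest => if (x.1, x.2.1) = cell then x.2.2 else pyGetCell rest cell

def check_only_possible_location (key : Int × Int) (value : Int) (unknowns : List (Int × Int × List Int)) : Bool :=
  let row := (unknowns.filter (fun x => decide (x.1 = key.1) && decide ((x.1, x.2.1) ≠ key))).map (fun x => x.2.2)
  let column := (unknowns.filter (fun x => decide (x.2.1 = key.2) && decide ((x.1, x.2.1) ≠ key))).map (fun x => x.2.2)
  let square := (PySem.List.pyRange 0 3 1).flatMap (fun i =>
    ((PySem.List.pyRange 0 3 1).filter (fun j =>
        decide ((PySem.Int.floordiv key.1 3 * 3 + i, PySem.Int.floordiv key.2 3 * 3 + j) ≠ key))).map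
      (fun j => pyGetCell unknowns (PySem.Int.floordiv key.1 3 * 3 + i, PySem.Int.floordiv key.2 3 * 3 + j)))
  let flattened_row := PySem.Set.ofList row.flatten
  let flattened_column := PySem.Set.ofList column.flatten
  let flattened_square := PySem.Set.ofList square.flatten
  !(PySem.Set.contains flattened_row value) || !(PySem.Set.contains flattened_column value) || !(PySem.Set.contains flattened_square value)

-- ===== PORT B =====
def check_only_possible_location_alt (key : Int × Int) (value : Int) (unknowns : List (Int × Int × List Int)) : Bool :=
  let st := unknowns.foldl (fun (st : Bool × Bool × Bool) x =>
    if (x.1, x.2.1) = key ∨ value ∉ x.2.2 then st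
    else
      (st.1 || decide (x.1 = key.1),
       st.2.1 || decide (x.2.1 = key.2),
       st.2.2 || decide (PySem.Int.floordiv x.1 3 = PySem.Int.floordiv key.1 3 ∧
                         PySem.Int.floordiv x.2.1 3 = PySem.Int.floordiv key.2 3)))
    (false, false, false)
  !st.1 || !st.2.1 || !st.2.2

-- ===== PRECONDITION & SPEC =====
-- Pre_ requires the (row, col) keys of the association list to be pairwise distinct: unknowns is a
-- Python dict, whose keys are unique, so duplicate-key lists correspond to no Python input at all.
def Pre_check_only_possible_location (key : Int × Int) (value : Int) (unknowns : List (Int × Int × List Int)) : Prop :=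
  (unknowns.map (fun x => (x.1, x.2.1))).Nodup
instance (key : Int × Int) (value : Int) (unknowns : List (Int × Int × List Int)) : Decidable (Pre_check_only_possible_location key value unknowns) := by unfold Pre_check_only_possible_location; infer_instance
def pvWitness_check_only_possible_location : (Int × Int) × Int × (List (Int × Int × List Int)) :=
  ((0, 0), 5, [(0, 1, [5, 3]), (1, 0, [5]), (1, 1, [5, 2])])

def Spec_check_only_possible_location (key : Int × Int) (value : Int) (unknowns : List (Int × Int × List Int)) (out : Bool) : Prop := out = check_only_possible_location_alt key value unknowns
instance (key : Int × Int) (value : Int) (unknowns : List (Int × Int × List Int)) (out : Bool) : Decidable (Spec_check_only_possible_location key value unknowns out) := by unfold Spec_check_only_possible_location; infer_instance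

-- ===== CLAIM (what is proved, stated in full; the proofs are below) =====
def Claim_equal_check_only_possible_location : Prop := ∀ (key : Int × Int) (value : Int) (unknowns : List (Int × Int × List Int)), Dom_check_only_possible_location key value unknowns → Pre_check_only_possible_location key value unknowns → Spec_check_only_possible_location key value unknowns (check_only_possible_location key value unknowns)

-- ===== LEMMAS AND PROOFS =====

-- B's three flag predicates, one per constraint group.
def pvQ1 (key : Int × Int) (value : Int) (x : Int × Int × List Int) : Bool :=
  decide (¬((x.1, x.2.1) = key ∨ value ∉ x.2.2)) && decide (x.1 = key.1)
def pvQ2 (key : Int × Int) (value : Int) (x : Int × Int × List Int) : Bool :=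
  decide (¬((x.1, x.2.1) = key ∨ value ∉ x.2.2)) && decide (x.2.1 = key.2)
def pvQ3 (key : Int × Int) (value : Int) (x : Int × Int × List Int) : Bool :=
  decide (¬((x.1, x.2.1) = key ∨ value ∉ x.2.2)) &&
  decide (PySem.Int.floordiv x.1 3 = PySem.Int.floordiv key.1 3 ∧
          PySem.Int.floordiv x.2.1 3 = PySem.Int.floordiv key.2 3)

lemma foldl_flags (key : Int × Int) (value : Int) (l : List (Int × Int × List Int))
    (a b c : Bool) :
    l.foldl (fun (st : Bool × Bool × Bool) x =>
      if (x.1, x.2.1) = key ∨ value ∉ x.2.2 then st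
      else
        (st.1 || decide (x.1 = key.1),
         st.2.1 || decide (x.2.1 = key.2),
         st.2.2 || decide (PySem.Int.floordiv x.1 3 = PySem.Int.floordiv key.1 3 ∧
                           PySem.Int.floordiv x.2.1 3 = PySem.Int.floordiv key.2 3))) (a, b, c)
    = (a || l.any (pvQ1 key value), b || l.any (pvQ2 key value), c || l.any (pvQ3 key value)) := by
  induction l generalizing a b c with
  | nil => simp
  | cons x rest ih =>
    rw [List.foldl_cons]
    by_cases h : (x.1, x.2.1) = key ∨ value ∉ x.2.2
    · rw [if_pos h, ih, List.any_cons, List.any_cons, List.any_cons]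
      simp [pvQ1, pvQ2, pvQ3, h]
    · rw [if_neg h, ih, List.any_cons, List.any_cons, List.any_cons]
      simp [pvQ1, pvQ2, pvQ3, h, Bool.or_assoc]

lemma mem_pyGetCell (unknowns : List (Int × Int × List Int)) (cell : Int × Int) (value : Int)
    (hnd : (unknowns.map (fun x => (x.1, x.2.1))).Nodup) :
    value ∈ pyGetCell unknowns cell ↔ ∃ x ∈ unknowns, (x.1, x.2.1) = cell ∧ value ∈ x.2.2 := by
  induction unknowns with
  | nil => simp [pyGetCell]
  | cons x rest ih =>
    simp only [List.map_cons, List.nodup_cons] at hnd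
    by_cases h : (x.1, x.2.1) = cell
    · simp only [pyGetCell, h, if_true]
      constructor
      · intro hv; exact ⟨x, List.mem_cons_self, h, hv⟩
      · rintro ⟨y, hy, hkey, hv⟩
        rcases List.mem_cons.mp hy with rfl | hy'
        · exact hv
        · have hmem : (x.1, x.2.1) ∈ rest.map (fun z => (z.1, z.2.1)) := by
            rw [h, ← hkey]; exact List.mem_map_of_mem hy'
          exact absurd hmem hnd.1
    · simp only [pyGetCell, h, if_false]
      rw [ih hnd.2]
      constructor
      · rintro ⟨y, hy, hkey, hv⟩; exact ⟨y, List.mem_cons_of_mem _ hy, hkey, hv⟩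
      · rintro ⟨y, hy, hkey, hv⟩
        rcases List.mem_cons.mp hy with rfl | hy'
        · exact absurd hkey h
        · exact ⟨y, hy', hkey, hv⟩

lemma fd3 (a b : Int) :
    PySem.Int.floordiv a 3 = PySem.Int.floordiv b 3 ↔
      (a = PySem.Int.floordiv b 3 * 3 + 0 ∨ a = PySem.Int.floordiv b 3 * 3 + 1 ∨
       a = PySem.Int.floordiv b 3 * 3 + 2) := by
  rw [PySem.Int.floordiv_eq_ediv_of_pos (a := a) (by norm_num),
      PySem.Int.floordiv_eq_ediv_of_pos (a := b) (by norm_num)]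
  omega

lemma pyRange03 : PySem.List.pyRange 0 3 1 = [0, 1, 2] := by decide

-- square-side characterisation: membership in A's flattened square list = B's q3 scan
lemma square_iff (key : Int × Int) (value : Int) (unknowns : List (Int × Int × List Int))
    (hnd : (unknowns.map (fun x => (x.1, x.2.1))).Nodup) :
    (value ∈ ((PySem.List.pyRange 0 3 1).flatMap (fun i =>
      ((PySem.List.pyRange 0 3 1).filter (fun j =>
          decide ((PySem.Int.floordiv key.1 3 * 3 + i, PySem.Int.floordiv key.2 3 * 3 + j) ≠ key))).map
        (fun j => pyGetCell unknowns (PySem.Int.floordiv key.1 3 * 3 + i, PySem.Int.floordiv key.2 3 * 3 + j)))).flatten)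
    ↔ unknowns.any (pvQ3 key value) = true := by
  rw [pyRange03]
  simp only [List.any_eq_true, pvQ3, Bool.and_eq_true, decide_eq_true_eq, not_or, not_not,
    List.mem_flatten, List.mem_flatMap, List.mem_map, List.mem_filter]
  constructor
  · rintro ⟨L, ⟨i, hi, j, ⟨hj, hne⟩, rfl⟩, hv⟩
    rw [mem_pyGetCell _ _ _ hnd] at hv
    obtain ⟨x, hx, hkey, hval⟩ := hv
    have h1 : x.1 = PySem.Int.floordiv key.1 3 * 3 + i := congrArg Prod.fst hkey
    have h2 : x.2.1 = PySem.Int.floordiv key.2 3 * 3 + j := congrArg Prod.snd hkey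
    have hi' : i = 0 ∨ i = 1 ∨ i = 2 := by simpa using hi
    have hj' : j = 0 ∨ j = 1 ∨ j = 2 := by simpa using hj
    refine ⟨x, hx, ⟨⟨fun hk => hne (by rw [← hkey, hk]), hval⟩, ?_, ?_⟩⟩
    · rw [fd3]
      rcases hi' with rfl | rfl | rfl
      · exact Or.inl h1
      · exact Or.inr (Or.inl h1)
      · exact Or.inr (Or.inr h1)
    · rw [fd3]
      rcases hj' with rfl | rfl | rfl
      · exact Or.inl h2
      · exact Or.inr (Or.inl h2)
      · exact Or.inr (Or.inr h2)
  · rintro ⟨x, hx, ⟨hxk, hval⟩, hb1, hb2⟩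
    rw [fd3] at hb1 hb2
    have hi : ∃ i, (i = (0:Int) ∨ i = 1 ∨ i = 2) ∧ x.1 = PySem.Int.floordiv key.1 3 * 3 + i := by
      rcases hb1 with h | h | h
      · exact ⟨0, Or.inl rfl, h⟩
      · exact ⟨1, Or.inr (Or.inl rfl), h⟩
      · exact ⟨2, Or.inr (Or.inr rfl), h⟩
    have hj : ∃ j, (j = (0:Int) ∨ j = 1 ∨ j = 2) ∧ x.2.1 = PySem.Int.floordiv key.2 3 * 3 + j := by
      rcases hb2 with h | h | h
      · exact ⟨0, Or.inl rfl, h⟩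
      · exact ⟨1, Or.inr (Or.inl rfl), h⟩
      · exact ⟨2, Or.inr (Or.inr rfl), h⟩
    obtain ⟨i, hi3, hx1⟩ := hi
    obtain ⟨j, hj3, hx2⟩ := hj
    refine ⟨pyGetCell unknowns (PySem.Int.floordiv key.1 3 * 3 + i, PySem.Int.floordiv key.2 3 * 3 + j),
      ⟨i, by rcases hi3 with rfl | rfl | rfl <;> simp, j,
        ⟨by rcases hj3 with rfl | rfl | rfl <;> simp, ?_⟩, rfl⟩, ?_⟩
    · intro hcell
      exact hxk (by rw [← hcell, ← hx1, ← hx2])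
    · rw [mem_pyGetCell _ _ _ hnd]
      exact ⟨x, hx, by rw [← hx1, ← hx2], hval⟩

lemma rowcol_iff (key : Int × Int) (value : Int) (unknowns : List (Int × Int × List Int))
    (p : Int × Int × List Int → Bool) :
    (value ∈ ((unknowns.filter (fun x => p x && decide ((x.1, x.2.1) ≠ key))).map (fun x => x.2.2)).flatten)
    ↔ unknowns.any (fun x => decide (¬((x.1, x.2.1) = key ∨ value ∉ x.2.2)) && p x) = true := by
  simp only [List.mem_flatten, List.mem_map, List.mem_filter, List.any_eq_true,
    Bool.and_eq_true, decide_eq_true_eq, not_or, not_not]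
  constructor
  · rintro ⟨L, ⟨x, ⟨hx, hp, hne⟩, rfl⟩, hv⟩
    exact ⟨x, hx, ⟨hne, hv⟩, hp⟩
  · rintro ⟨x, hx, ⟨hne, hv⟩, hp⟩
    exact ⟨x.2.2, ⟨x, ⟨hx, hp, hne⟩, rfl⟩, hv⟩

-- ===== VERDICT (by name: the statement is the Claim_ definition above) =====
theorem check_only_possible_location_spec : Claim_equal_check_only_possible_location := by
  intro key value unknowns _hdom hpre
  unfold Spec_check_only_possible_location
  simp only [check_only_possible_location, check_only_possible_location_alt, foldl_flags,
    Bool.false_or]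
  have h1 : PySem.Set.contains (PySem.Set.ofList
      ((unknowns.filter (fun x => decide (x.1 = key.1) && decide ((x.1, x.2.1) ≠ key))).map
        (fun x => x.2.2)).flatten) value = unknowns.any (pvQ1 key value) := by
    rw [Bool.eq_iff_iff, PySem.Set.contains_iff, PySem.Set.mem_ofList]
    exact rowcol_iff key value unknowns _
  have h2 : PySem.Set.contains (PySem.Set.ofList
      ((unknowns.filter (fun x => decide (x.2.1 = key.2) && decide ((x.1, x.2.1) ≠ key))).map
        (fun x => x.2.2)).flatten) value = unknowns.any (pvQ2 key value) := by
    rw [Bool.eq_iff_iff, PySem.Set.contains_iff, PySem.Set.mem_ofList]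
    exact rowcol_iff key value unknowns _
  have h3 : PySem.Set.contains (PySem.Set.ofList
      ((PySem.List.pyRange 0 3 1).flatMap (fun i =>
        ((PySem.List.pyRange 0 3 1).filter (fun j =>
            decide ((PySem.Int.floordiv key.1 3 * 3 + i, PySem.Int.floordiv key.2 3 * 3 + j) ≠ key))).map
          (fun j => pyGetCell unknowns (PySem.Int.floordiv key.1 3 * 3 + i,
            PySem.Int.floordiv key.2 3 * 3 + j)))).flatten) value
      = unknowns.any (pvQ3 key value) := by
    rw [Bool.eq_iff_iff, PySem.Set.contains_iff, PySem.Set.mem_ofList]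
    exact square_iff key value unknowns hpre
  rw [h1, h2, h3]
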